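-- pv_equiv track=rewrite | github.com/maks-mishin/algorithms-datastructures | level0/tasks/white_walkers.py | white_walkers
-- ===== SOURCE A (Python) =====
-- def make_digit_indexes(value: str) -> list:
--     return [i for i in range(len(value)) if value[i].isdigit()]
--
-- def count_white_walkers(substring: str) -> int:
--     return substring.count('=')
--
-- def white_walkers(value: str) -> bool:
--     digit_indexes = make_digit_indexes(value)
--
--     if len(digit_indexes) <= 1:
--         return False
--
--     count_pairs, count_walkers = 0, 0
--     for i in range(len(digit_indexes) - 1):
--         if (int(value[digit_indexes[i]]) +
--                 int(value[digit_indexes[i + 1]]) != 10):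
--             continue
--         count_pairs += 1
--         amount_white_walkers = count_white_walkers(
--             value[digit_indexes[i]:digit_indexes[i + 1] + 1]
--         )
--         if amount_white_walkers == 3:
--             count_walkers += 1
--     return count_walkers == count_pairs
-- ===== SOURCE B (Python) =====
-- def white_walkers(value: str) -> bool:
--     # prefix[k] = number of equals signs among the first k characters -> O(1) range queries
--     prefix = [0]
--     acc = 0
--     for ch in value:
--         acc += (ch == '=')
--         prefix.append(acc)
--     digits = [i for i, ch in enumerate(value) if ch.isdigit()]
--     if len(digits) < 2:
--         return False
--     return all(int(value[i]) + int(value[j]) != 10 or prefix[j] - prefix[i] == 3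
--                for i, j in zip(digits, digits[1:]))
-- ===== Notes on version B (the rewrite author's own statement) =====
-- stated objective: alternative
-- what changed: Replaces A's per-pair substring slicing and counting (and its walkers==pairs counter comparison) by a prefix table of running equals-sign counts queried in O(1) per adjacent digit pair, combined with all(...) over zipped adjacent digit indexes.
import Mathlib
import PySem

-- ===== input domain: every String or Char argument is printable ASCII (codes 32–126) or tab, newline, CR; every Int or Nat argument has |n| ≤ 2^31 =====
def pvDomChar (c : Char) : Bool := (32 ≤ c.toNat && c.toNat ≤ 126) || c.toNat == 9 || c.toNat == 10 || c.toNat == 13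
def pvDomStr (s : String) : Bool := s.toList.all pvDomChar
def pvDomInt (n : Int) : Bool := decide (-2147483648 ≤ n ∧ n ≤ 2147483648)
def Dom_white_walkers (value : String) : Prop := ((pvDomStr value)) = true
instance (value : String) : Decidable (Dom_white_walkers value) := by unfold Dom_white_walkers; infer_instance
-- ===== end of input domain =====

-- B replaces A's per-pair substring slicing/counting by a prefix table of running
-- equals-sign counts queried in O(1) per adjacent digit pair, checked with all(...) (objective: alternative).

-- value[i].isdigit() (an index produced by the comprehension, always in range)
def pvIsDigitAt (cs : List Char) (i : Int) : Bool :=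
  match PySem.List.pyGet? cs i with
  | some c => PySem.Chars.isdigit c
  | none => false

-- int(value[i]) (on the executed paths the index is always a digit position)
def pvIntAt (cs : List Char) (i : Int) : Int :=
  match PySem.List.pyGet? cs i with
  | some c => (PySem.Int.ofChars? [c]).getD 0
  | none => 0

-- ===== PORT A =====
def white_walkers (value : String) : Bool :=
  let cs := value.toList
  -- make_digit_indexes
  let digit_indexes := (PySem.List.pyRange 0 (PySem.Str.len value)).filter (pvIsDigitAt cs)
  if digit_indexes.length ≤ 1 then false
  else
    let r := (PySem.List.pyRange 0 ((digit_indexes.length : Int) - 1)).foldl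
      (fun (st : Int × Int) i =>
        if pvIntAt cs (PySem.List.pyGetD digit_indexes i 0) +
            pvIntAt cs (PySem.List.pyGetD digit_indexes (i + 1) 0) ≠ 10 then st
        else
          -- count_white_walkers(value[digit_indexes[i]:digit_indexes[i+1]+1])
          let amount : Int := PySem.Chars.count
            (PySem.List.slice cs (some (PySem.List.pyGetD digit_indexes i 0))
              (some (PySem.List.pyGetD digit_indexes (i + 1) 0 + 1))) ['=']
          (st.1 + 1, if amount = 3 then st.2 + 1 else st.2))
      (0, 0)
    decide (r.2 = r.1)

-- ===== PORT B =====
-- the loop body of B's prefix-table pass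
def pvPrefixStep (st : List Int × Int) (ch : Char) : List Int × Int :=
  let acc := st.2 + (if ch = '=' then 1 else 0)
  (st.1 ++ [acc], acc)

def white_walkers_alt (value : String) : Bool :=
  let cs := value.toList
  let prefx := (cs.foldl pvPrefixStep ([0], 0)).1
  let digits := ((PySem.List.enumerate cs).filter (fun p => PySem.Chars.isdigit p.2)).map (·.1)
  if digits.length < 2 then false
  else
    (digits.zip digits.tail).all (fun p =>
      !(pvIntAt cs p.1 + pvIntAt cs p.2 == 10) ||
        (PySem.List.pyGetD prefx p.2 0 - PySem.List.pyGetD prefx p.1 0 == 3))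

-- ===== PRECONDITION & SPEC =====
def Spec_white_walkers (value : String) (out : Bool) : Prop := out = white_walkers_alt value
instance (value : String) (out : Bool) : Decidable (Spec_white_walkers value out) := by unfold Spec_white_walkers; infer_instance

-- ===== CLAIM (what is proved, stated in full; the proofs are below) =====
def Claim_equal_white_walkers : Prop := ∀ (value : String), Dom_white_walkers value → Spec_white_walkers value (white_walkers value)

-- ===== LEMMAS AND PROOFS =====

theorem pyGet?_eq_some (cs : List Char) (i : Int) (h0 : 0 ≤ i) (h1 : i < cs.length) :
    PySem.List.pyGet? cs i = some cs[i.toNat] := by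
  simp only [PySem.List.pyGet?, PySem.List.pyIdx?]
  rw [if_pos h0, if_pos h1]
  simp [List.getElem?_eq_getElem (by omega : i.toNat < cs.length)]

-- PySem's substring counter with a single-character needle is List.count
theorem count_go_single (c : Char) (s : List Char) (fuel acc : Nat) (h : s.length ≤ fuel) :
    PySem.Chars.count.go [c] fuel s acc = acc + s.count c := by
  induction fuel generalizing s acc with
  | zero =>
    have : s = [] := List.length_eq_zero_iff.mp (by omega)
    subst this; simp [PySem.Chars.count.go]
  | succ f ih =>
    cases s with
    | nil => simp [PySem.Chars.count.go]
    | cons hd t =>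
      rw [PySem.Chars.count.go]
      simp only [List.isPrefixOf, Bool.and_true, List.length_nil, List.drop_zero,
        List.length_cons, List.drop_succ_cons]
      by_cases hc : c = hd
      · subst hc
        rw [if_pos (by simp)]
        rw [ih t (acc + 1) (by simpa using h)]
        simp; omega
      · rw [if_neg (by simpa using hc)]
        rw [ih t acc (by simpa using h)]
        simp only [List.count_cons]
        simp [Ne.symm hc]

theorem chars_count_single (c : Char) (s : List Char) :
    PySem.Chars.count s [c] = s.count c := by
  simp [PySem.Chars.count, count_go_single c s s.length 0 le_rfl]

-- pure form of B's prefix list: running '='-counts, one entry per character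
def pvPrefixes (acc : Int) : List Char → List Int
  | [] => []
  | c :: t => (acc + (if c = '=' then 1 else 0)) :: pvPrefixes (acc + (if c = '=' then 1 else 0)) t

theorem foldl_pvPrefixStep (cs : List Char) (pl : List Int) (acc : Int) :
    (cs.foldl pvPrefixStep (pl, acc)).1 = pl ++ pvPrefixes acc cs := by
  induction cs generalizing pl acc with
  | nil => simp [pvPrefixes]
  | cons c t ih => simp [pvPrefixStep, pvPrefixes, ih]

theorem pvPrefixes_getElem? (cs : List Char) (acc : Int) (k : Nat) (hk : k < cs.length) :
    (pvPrefixes acc cs)[k]? = some (acc + ((cs.take (k + 1)).count '=' : Int)) := by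
  induction cs generalizing acc k with
  | nil => simp at hk
  | cons c t ih =>
    cases k with
    | zero =>
      by_cases h : c = '=' <;>
        simp [pvPrefixes, h]
    | succ k =>
      simp only [pvPrefixes, List.getElem?_cons_succ, List.take_succ_cons, List.count_cons]
      rw [ih _ k (by simpa using hk)]
      by_cases h : c = '=' <;> simp [h] <;> ring_nf

-- prefix[k] = number of '=' among the first k characters
theorem prefix_at (cs : List Char) (k : Nat) (hk : k ≤ cs.length) :
    PySem.List.pyGetD (0 :: pvPrefixes 0 cs) (k : Int) 0 = ((cs.take k).count '=' : Int) := by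
  rw [PySem.List.pyGetD_natCast]
  cases k with
  | zero => simp
  | succ k =>
    have h := pvPrefixes_getElem? cs 0 k (by omega)
    simp [List.getD, h]

-- number of '=' in value[i:j+1] as a difference of prefix counts, when cs[j] is a digit
theorem slice_count_eq (cs : List Char) (i j : Nat) (hij : i < j) (hj : j < cs.length)
    (hdig : PySem.Chars.isdigit cs[j] = true) :
    (PySem.Chars.count (PySem.List.slice cs (some (i : Int)) (some ((j : Int) + 1))) ['='] : Int)
      = ((cs.take j).count '=' : Int) - ((cs.take i).count '=' : Int) := by
  have hcast : ((j : Int) + 1) = ((j + 1 : Nat) : Int) := by push_cast; ring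
  rw [hcast, PySem.List.slice_natCast]
  have hne : cs[j] ≠ '=' := by
    intro h; rw [h] at hdig; exact absurd hdig (by decide)
  have h1 : cs.take (j + 1) = cs.take i ++ (cs.drop i).take (j + 1 - i) := by
    rw [← List.take_add]
    congr 1
    omega
  have h2 : cs.take (j + 1) = cs.take j ++ [cs[j]] := by
    rw [List.take_add_one]
    simp [List.getElem?_eq_getElem hj]
  have hc1 : (cs.take (j + 1)).count '=' = (cs.take i).count '=' + ((cs.drop i).take (j + 1 - i)).count '=' := by
    rw [h1, List.count_append]
  have hc2 : (cs.take (j + 1)).count '=' = (cs.take j).count '=' := by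
    rw [h2, List.count_append]
    simp [hne]
  rw [chars_count_single]
  omega

-- A's digit-index list = B's digit-index list
theorem digits_eq (cs : List Char) :
    ((PySem.List.enumerate cs).filter (fun p => PySem.Chars.isdigit p.2)).map (·.1)
      = (PySem.List.pyRange 0 (cs.length : Int)).filter (pvIsDigitAt cs) := by
  rw [PySem.List.enumerate_eq_map_pyRange cs ' ']
  have hlen : PySem.List.len cs = (cs.length : Int) := by simp [pysem]
  rw [hlen, List.filter_map]
  have : ∀ x ∈ PySem.List.pyRange 0 ((cs.length : Int)),
      ((fun p : Int × Char => PySem.Chars.isdigit p.2) ∘ (fun j => (j, PySem.List.pyGetD cs j ' '))) x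
        = pvIsDigitAt cs x := by
    intro x hx
    obtain ⟨h0, h1⟩ := PySem.List.mem_pyRange_one.mp hx
    have h1' : x < cs.length := by exact_mod_cast h1
    simp only [pvIsDigitAt, Function.comp, pyGet?_eq_some cs x h0 h1']
    rw [PySem.List.pyGetD_eq_getElem cs ' ' h0 (by exact_mod_cast h1)]
  rw [List.filter_congr this, List.map_map]
  have : ((fun p : Int × Char => p.1) ∘ (fun j => (j, PySem.List.pyGetD cs j ' '))) = id := rfl
  rw [this, List.map_id]

-- A's counting loop ends with walkers = pairs iff every qualifying pair is good
theorem loop_char (l : List Int) (P Q : Int → Prop) [DecidablePred P] [DecidablePred Q]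
    (p w : Int) (h : w ≤ p) :
    ((l.foldl (fun (st : Int × Int) i =>
        if P i then st else (st.1 + 1, if Q i then st.2 + 1 else st.2)) (p, w)).2
      = (l.foldl (fun (st : Int × Int) i =>
        if P i then st else (st.1 + 1, if Q i then st.2 + 1 else st.2)) (p, w)).1)
      ↔ (w = p ∧ ∀ i ∈ l, ¬ P i → Q i) := by
  induction l generalizing p w with
  | nil => simp
  | cons a t ih =>
    simp only [List.foldl_cons, List.mem_cons]
    by_cases hP : P a
    · rw [if_pos hP, ih p w h]
      constructor
      · rintro ⟨h1, h2⟩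
        refine ⟨h1, ?_⟩
        rintro i (rfl | hi) hni
        · exact absurd hP hni
        · exact h2 i hi hni
      · rintro ⟨h1, h2⟩
        exact ⟨h1, fun i hi => h2 i (Or.inr hi)⟩
    · rw [if_neg hP]
      by_cases hQ : Q a
      · rw [if_pos hQ, ih (p + 1) (w + 1) (by omega)]
        constructor
        · rintro ⟨h1, h2⟩
          refine ⟨by omega, ?_⟩
          rintro i (rfl | hi) hni
          · exact hQ
          · exact h2 i hi hni
        · rintro ⟨h1, h2⟩
          exact ⟨by omega, fun i hi => h2 i (Or.inr hi)⟩
      · rw [if_neg hQ, ih (p + 1) w (by omega)]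
        constructor
        · rintro ⟨h1, _⟩; omega
        · rintro ⟨_, h2⟩
          exact absurd (h2 a (Or.inl rfl) hP) hQ

-- adjacent pairs of a list as a map over indices
theorem zip_tail_eq (l : List Int) :
    l.zip l.tail = (PySem.List.pyRange 0 ((l.length : Int) - 1)).map
      (fun i => (PySem.List.pyGetD l i 0, PySem.List.pyGetD l (i + 1) 0)) := by
  apply List.ext_getElem
  · simp [PySem.List.length_pyRange_one]
  · intro k h1 h2
    have hk : k + 1 < l.length := by
      simp at h1; omega
    rw [List.getElem_map, PySem.List.getElem_pyRange_one]
    rw [List.getElem_zip]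
    simp only [zero_add]
    rw [PySem.List.pyGetD_natCast, List.getD_eq_getElem _ _ (by omega)]
    have : (k : Int) + 1 = ((k + 1 : Nat) : Int) := by push_cast; ring
    rw [this, PySem.List.pyGetD_natCast, List.getD_eq_getElem _ _ (by omega)]
    congr 1
    rw [List.getElem_tail]

-- ===== VERDICT (by name: the statement is the Claim_ definition above) =====
theorem white_walkers_spec : Claim_equal_white_walkers := by
  intro value _
  unfold Spec_white_walkers white_walkers white_walkers_alt
  dsimp only
  have hlen : PySem.Str.len value = (value.toList.length : Int) := by simp [pysem]
  rw [hlen, digits_eq value.toList]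
  generalize value.toList = cs
  generalize hidx : (PySem.List.pyRange 0 (cs.length : Int)).filter (pvIsDigitAt cs) = idx
  by_cases hguard : idx.length ≤ 1
  · rw [if_pos hguard, if_pos (by omega)]
  · rw [if_neg hguard, if_neg (by omega)]
    -- facts about the digit-index list
    have hmem : ∀ e ∈ idx, 0 ≤ e ∧ e < cs.length ∧ pvIsDigitAt cs e = true := by
      intro e he
      rw [← hidx, List.mem_filter] at he
      obtain ⟨h1, h2⟩ := he
      obtain ⟨h3, h4⟩ := PySem.List.mem_pyRange_one.mp h1
      exact ⟨h3, h4, h2⟩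
    have hpair : idx.Pairwise (· < ·) := by
      rw [← hidx]
      exact (PySem.List.pairwise_lt_pyRange_one 0 (cs.length : Int)).filter _
    rw [foldl_pvPrefixStep, List.singleton_append, zip_tail_eq, List.all_map]
    apply Bool.eq_iff_iff.mpr
    rw [decide_eq_true_iff,
        loop_char _ (fun i => pvIntAt cs (PySem.List.pyGetD idx i 0) +
            pvIntAt cs (PySem.List.pyGetD idx (i + 1) 0) ≠ 10)
          (fun i => ((PySem.Chars.count
            (PySem.List.slice cs (some (PySem.List.pyGetD idx i 0))
              (some (PySem.List.pyGetD idx (i + 1) 0 + 1))) ['='] : Int) = 3)) 0 0 le_rfl,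
        List.all_eq_true]
    have key : ∀ i ∈ PySem.List.pyRange 0 ((idx.length : Int) - 1),
        ((((fun p : Int × Int =>
            !(pvIntAt cs p.1 + pvIntAt cs p.2 == 10) ||
              (PySem.List.pyGetD (0 :: pvPrefixes 0 cs) p.2 0 -
                PySem.List.pyGetD (0 :: pvPrefixes 0 cs) p.1 0 == 3)) ∘
          (fun i => (PySem.List.pyGetD idx i 0, PySem.List.pyGetD idx (i + 1) 0))) i = true)
          ↔ (¬ (pvIntAt cs (PySem.List.pyGetD idx i 0) +
                pvIntAt cs (PySem.List.pyGetD idx (i + 1) 0) ≠ 10) →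
              ((PySem.Chars.count
                (PySem.List.slice cs (some (PySem.List.pyGetD idx i 0))
                  (some (PySem.List.pyGetD idx (i + 1) 0 + 1))) ['='] : Int) = 3))) := by
      intro i hi
      obtain ⟨hi0, hi1⟩ := PySem.List.mem_pyRange_one.mp hi
      have hklt' : i.toNat < idx.length := by omega
      have hklt : i.toNat + 1 < idx.length := by omega
      have hx : PySem.List.pyGetD idx i 0 = idx[i.toNat]'hklt' :=
        PySem.List.pyGetD_eq_getElem idx 0 hi0 (by omega)
      have hy : PySem.List.pyGetD idx (i + 1) 0 = idx[i.toNat + 1]'hklt := by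
        rw [PySem.List.pyGetD_eq_getElem idx 0 (by omega) (by omega)]
        simp only [show (i + 1).toNat = i.toNat + 1 from by omega]
      have hxmem : PySem.List.pyGetD idx i 0 ∈ idx := by
        rw [hx]; exact List.getElem_mem _
      have hymem : PySem.List.pyGetD idx (i + 1) 0 ∈ idx := by
        rw [hy]; exact List.getElem_mem _
      have hxy : PySem.List.pyGetD idx i 0 < PySem.List.pyGetD idx (i + 1) 0 := by
        rw [hx, hy]
        exact List.pairwise_iff_getElem.mp hpair i.toNat (i.toNat + 1) hklt' hklt (by omega)
      obtain ⟨hx0, hx1, _⟩ := hmem _ hxmem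
      obtain ⟨hy0, hy1, hydig⟩ := hmem _ hymem
      -- pass to Nat indices
      have hxx : PySem.List.pyGetD idx i 0 = ((PySem.List.pyGetD idx i 0).toNat : Int) := by omega
      have hyy : PySem.List.pyGetD idx (i + 1) 0 = ((PySem.List.pyGetD idx (i + 1) 0).toNat : Int) := by omega
      have hjxy : (PySem.List.pyGetD idx i 0).toNat < (PySem.List.pyGetD idx (i + 1) 0).toNat := by omega
      have hjylt : (PySem.List.pyGetD idx (i + 1) 0).toNat < cs.length := by omega
      have hydig' : PySem.Chars.isdigit cs[(PySem.List.pyGetD idx (i + 1) 0).toNat] = true := by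
        rw [pvIsDigitAt, pyGet?_eq_some cs _ hy0 (by exact_mod_cast hy1)] at hydig
        exact hydig
      rw [Function.comp_apply, hxx, hyy]
      rw [slice_count_eq cs _ _ hjxy hjylt hydig']
      rw [prefix_at cs _ (by omega), prefix_at cs _ (by omega)]
      simp only [Bool.or_eq_true, Bool.not_eq_eq_eq_not, Bool.not_true, beq_eq_false_iff_ne,
        beq_iff_eq, ne_eq, not_not]
      constructor
      · rintro (hne | heq)
        · intro hs; exact absurd hs hne
        · intro _; omega
      · intro himp
        by_cases hs : pvIntAt cs ((PySem.List.pyGetD idx i 0).toNat : Int) +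
            pvIntAt cs ((PySem.List.pyGetD idx (i + 1) 0).toNat : Int) = 10
        · right; have := himp hs; omega
        · left; exact hs
    constructor
    · rintro ⟨-, h⟩ i hi
      exact (key i hi).mpr (h i hi)
    · intro h
      exact ⟨rfl, fun i hi => (key i hi).mp (h i hi)⟩
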